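-- pv_equiv track=rewrite | github.com/karnation22/Project_Euler_Problems | numberspiral.py | getOnionCount
-- ===== SOURCE A (Python) =====
-- def getOnionCount(onion): #get contribution of each layer
-- 	total = 0
-- 	if(onion==0): return 1
-- 	squareRoot = 2*onion+1
-- 	square = int(squareRoot**2)
-- 	subtractor = squareRoot - 1
-- 	for corner in range(4):
-- 		total += square
-- 		square -= subtractor
-- 	return total
-- ===== SOURCE B (Python) =====
-- def getOnionCount(onion):
--     if onion == 0:
--         return 1
--     squareRoot = 2*onion + 1
--     square = squareRoot*squareRoot
--     subtractor = squareRoot - 1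
--     return 4*square - 6*subtractor
-- ===== Notes on version B (the rewrite author's own statement) =====
-- stated objective: simpler
-- what changed: Replaced the four-iteration accumulation loop over the corners with a single closed-form arithmetic expression in square and subtractor.
import Mathlib
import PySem

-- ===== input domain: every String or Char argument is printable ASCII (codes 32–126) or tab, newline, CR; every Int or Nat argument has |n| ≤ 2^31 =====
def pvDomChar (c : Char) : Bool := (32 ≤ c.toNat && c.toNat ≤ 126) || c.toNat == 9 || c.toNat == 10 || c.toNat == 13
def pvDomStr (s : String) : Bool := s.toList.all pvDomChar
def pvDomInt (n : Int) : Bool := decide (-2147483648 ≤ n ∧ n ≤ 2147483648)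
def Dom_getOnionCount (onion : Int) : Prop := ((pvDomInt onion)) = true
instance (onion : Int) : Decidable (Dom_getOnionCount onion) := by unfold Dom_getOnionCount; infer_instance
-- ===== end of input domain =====

-- ===== PORT A =====
-- literal port of A: guard, then a 4-step fold accumulating corners
def getOnionCount (onion : Int) : Int :=
  if onion == 0 then 1
  else
    let squareRoot := 2*onion + 1
    let square := squareRoot ^ 2
    let subtractor := squareRoot - 1
    let st := (List.range 4).foldl (fun (p : Int × Int) _ => (p.1 + p.2, p.2 - subtractor)) (0, square)
    st.1

-- ===== PORT B =====
-- port of B: closed form 4*square - 6*subtractor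
def getOnionCount_alt (onion : Int) : Int :=
  if onion == 0 then 1
  else
    let squareRoot := 2*onion + 1
    let square := squareRoot * squareRoot
    let subtractor := squareRoot - 1
    4*square - 6*subtractor

-- ===== PRECONDITION & SPEC =====
def Spec_getOnionCount (onion : Int) (out : Int) : Prop := out = getOnionCount_alt onion
instance (onion : Int) (out : Int) : Decidable (Spec_getOnionCount onion out) := by unfold Spec_getOnionCount; infer_instance

-- ===== CLAIM (what is proved, stated in full; the proofs are below) =====
def Claim_equal_getOnionCount : Prop := ∀ (onion : Int), Dom_getOnionCount onion → Spec_getOnionCount onion (getOnionCount onion)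

-- ===== LEMMAS AND PROOFS =====

-- ===== VERDICT (by name: the statement is the Claim_ definition above) =====
theorem getOnionCount_spec : Claim_equal_getOnionCount := by
  intro onion _
  unfold Spec_getOnionCount getOnionCount getOnionCount_alt
  by_cases h : onion == 0
  · simp [h]
  · simp only [h]
    simp [List.range_succ]
    ring
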